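-- pv_equiv track=rewrite | github.com/codinginpeace/WasteCollection | functions/funct.py | all_subsets_except_depot
-- ===== SOURCE A (Python) =====
-- from itertools import combinations
--
-- def all_subsets_except_depot(V, demands, vehicle_capacity, depot=0):
--     """Generate all subsets of V that do not contain the depot and whose total demand is within vehicle capacity."""
--     non_depot_nodes = [v for v in V if v != depot]
--     all_subsets = []
--     for r in range(1, len(non_depot_nodes) + 1):
--         for subset in combinations(non_depot_nodes, r):
--             total_demand = sum(demands[node] for node in subset)
--             if total_demand <= vehicle_capacity:
--                 all_subsets.append(subset)
--     return all_subsets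
-- ===== SOURCE B (Python) =====
-- def all_subsets_except_depot(V, demands, vehicle_capacity, depot=0):
--     """Recursive combination builder that threads the accumulated demand total,
--     instead of materialising each subset and re-summing it with sum()."""
--     nodes = [v for v in V if v != depot]
--
--     def build(rest, r, prefix, total):
--         # all size-r extensions of prefix using elements of rest (in order),
--         # keeping only those whose carried total stays within capacity
--         if r == 0:
--             return [tuple(prefix)] if total <= vehicle_capacity else []
--         if not rest:
--             return []
--         x, tail = rest[0], rest[1:]
--         return (build(tail, r - 1, prefix + [x], total + demands[x])
--                 + build(tail, r, prefix, total))
--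
--     out = []
--     for r in range(1, len(nodes) + 1):
--         out += build(nodes, r, [], 0)
--     return out
-- ===== Notes on version B (the rewrite author's own statement) =====
-- stated objective: alternative
-- what changed: Replaces itertools.combinations plus per-subset sum() with a recursive prefix-extension generator that threads the accumulated demand total along the recursion, so each subset's demand is never re-summed from scratch.
import Mathlib
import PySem

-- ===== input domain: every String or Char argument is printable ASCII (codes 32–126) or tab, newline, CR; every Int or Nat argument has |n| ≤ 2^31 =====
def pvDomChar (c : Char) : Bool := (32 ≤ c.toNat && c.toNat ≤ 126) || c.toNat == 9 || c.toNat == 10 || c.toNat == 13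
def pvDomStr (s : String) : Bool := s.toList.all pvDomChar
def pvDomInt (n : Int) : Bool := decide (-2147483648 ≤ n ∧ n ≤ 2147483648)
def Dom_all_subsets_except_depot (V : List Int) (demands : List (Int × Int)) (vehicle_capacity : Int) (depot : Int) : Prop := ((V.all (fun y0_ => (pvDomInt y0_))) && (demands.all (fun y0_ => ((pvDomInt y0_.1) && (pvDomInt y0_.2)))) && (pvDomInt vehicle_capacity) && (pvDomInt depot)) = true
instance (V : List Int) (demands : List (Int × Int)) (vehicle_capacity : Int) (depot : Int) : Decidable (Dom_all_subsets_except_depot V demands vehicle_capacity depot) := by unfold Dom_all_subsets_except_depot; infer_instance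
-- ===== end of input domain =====

-- B replaces itertools.combinations + per-subset sum() with a recursive pref builder
-- threading the accumulated demand total (objective: alternative, same asymptotic cost).
-- ===== PORT A =====
-- itertools.combinations(xs, r), lexicographic by position, each tuple as a list
def pyCombinations (xs : List Int) (r : Nat) : List (List Int) :=
  match r, xs with
  | 0, _ => [[]]
  | _ + 1, [] => []
  | r + 1, x :: rest => (pyCombinations rest r).map (fun s => x :: s) ++ pyCombinations rest (r + 1)

def all_subsets_except_depot (V : List Int) (demands : List (Int × Int)) (vehicle_capacity : Int) (depot : Int) : List (List Int) :=
  let non_depot_nodes := V.filter (fun v => !(v == depot))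
  (PySem.List.pyRange 1 ((non_depot_nodes.length : Int) + 1) 1).foldl
    (fun all_subsets r =>
      (pyCombinations non_depot_nodes r.toNat).foldl
        (fun acc subset =>
          -- demands[node]: dict lookup; Pre_ guarantees every non-depot node is a key
          let total_demand := subset.foldl (fun s node => s + (PySem.Dict.mk demands).getD node 0) 0
          if total_demand ≤ vehicle_capacity then acc ++ [subset] else acc)
        all_subsets)
    []

-- ===== PORT B =====
-- build rest r pref total: all size-r extensions of pref from rest, kept if the
-- carried total stays within capacity (transliteration of Source B's `build`)
def altBuild (demands : List (Int × Int)) (vehicle_capacity : Int) :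
    List Int → Nat → List Int → Int → List (List Int)
  | _, 0, pref, total => if total ≤ vehicle_capacity then [pref] else []
  | [], _ + 1, _, _ => []
  | x :: tail, r + 1, pref, total =>
      altBuild demands vehicle_capacity tail r (pref ++ [x]) (total + (PySem.Dict.mk demands).getD x 0)
        ++ altBuild demands vehicle_capacity tail (r + 1) pref total

def all_subsets_except_depot_alt (V : List Int) (demands : List (Int × Int)) (vehicle_capacity : Int) (depot : Int) : List (List Int) :=
  let nodes := V.filter (fun v => !(v == depot))
  (PySem.List.pyRange 1 ((nodes.length : Int) + 1) 1).foldl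
    (fun out r => out ++ altBuild demands vehicle_capacity nodes r.toNat [] 0) []

-- ===== PRECONDITION & SPEC =====
-- Pre_ excludes exactly the inputs where A raises KeyError: some non-depot node of V
-- is not a key of demands (that node occurs as a singleton subset, so demands[node] is hit).
def Pre_all_subsets_except_depot (V : List Int) (demands : List (Int × Int)) (vehicle_capacity : Int) (depot : Int) : Prop :=
  ∀ v ∈ V, v ≠ depot → ((PySem.Dict.mk demands).get? v).isSome
instance (V : List Int) (demands : List (Int × Int)) (vehicle_capacity : Int) (depot : Int) : Decidable (Pre_all_subsets_except_depot V demands vehicle_capacity depot) := by unfold Pre_all_subsets_except_depot; infer_instance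
def pvWitness_all_subsets_except_depot : List Int × (List (Int × Int)) × Int × Int :=
  ([1, 2, 0], [(1, 3), (2, -1)], 2, 0)
def Spec_all_subsets_except_depot (V : List Int) (demands : List (Int × Int)) (vehicle_capacity : Int) (depot : Int) (out : List (List Int)) : Prop := out = all_subsets_except_depot_alt V demands vehicle_capacity depot
instance (V : List Int) (demands : List (Int × Int)) (vehicle_capacity : Int) (depot : Int) (out : List (List Int)) : Decidable (Spec_all_subsets_except_depot V demands vehicle_capacity depot out) := by unfold Spec_all_subsets_except_depot; infer_instance

-- ===== CLAIM (what is proved, stated in full; the proofs are below) =====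
def Claim_equal_all_subsets_except_depot : Prop := ∀ (V : List Int) (demands : List (Int × Int)) (vehicle_capacity : Int) (depot : Int), Dom_all_subsets_except_depot V demands vehicle_capacity depot → Pre_all_subsets_except_depot V demands vehicle_capacity depot → Spec_all_subsets_except_depot V demands vehicle_capacity depot (all_subsets_except_depot V demands vehicle_capacity depot)

-- ===== LEMMAS AND PROOFS =====

-- shifting the start of the demand-sum fold
theorem foldl_demand_shift (d : List (Int × Int)) (s : List Int) (a : Int) :
    s.foldl (fun acc node => acc + (PySem.Dict.mk d).getD node 0) a
      = a + s.foldl (fun acc node => acc + (PySem.Dict.mk d).getD node 0) 0 := by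
  induction s generalizing a with
  | nil => simp
  | cons x t ih =>
      simp only [List.foldl_cons]
      rw [ih (a + _), ih ((0 : Int) + _)]
      ring

-- B's builder = the (sum ≤ cap)-filtered combinations, each prefixed
theorem altBuild_eq_filter (d : List (Int × Int)) (cap : Int) (nodes : List Int)
    (r : Nat) (pref : List Int) (total : Int) :
    altBuild d cap nodes r pref total
      = ((pyCombinations nodes r).filter
          (fun s => total + s.foldl (fun acc node => acc + (PySem.Dict.mk d).getD node 0) 0 ≤ cap)).map
          (fun s => pref ++ s) := by
  induction nodes generalizing r pref total with
  | nil =>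
      match r with
      | 0 => by_cases h : total ≤ cap <;> simp [altBuild, pyCombinations, h]
      | r + 1 => simp [altBuild, pyCombinations]
  | cons x tail ih =>
      match r with
      | 0 => by_cases h : total ≤ cap <;> simp [altBuild, pyCombinations, h]
      | r + 1 =>
          simp only [altBuild, pyCombinations, List.filter_append, List.map_append]
          rw [ih, ih, List.filter_map, List.map_map]
          have hp : ((fun s => decide (total + List.foldl (fun acc node => acc + (PySem.Dict.mk d).getD node 0) 0 s ≤ cap)) ∘ (fun s => x :: s))
              = fun s => decide (total + (PySem.Dict.mk d).getD x 0 + List.foldl (fun acc node => acc + (PySem.Dict.mk d).getD node 0) 0 s ≤ cap) := by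
            funext s
            simp only [Function.comp, List.foldl_cons, decide_eq_decide]
            rw [foldl_demand_shift]
            omega
          have hf : ((fun s => pref ++ s) ∘ (fun s => x :: s))
              = fun s => (pref ++ [x]) ++ s := by
            funext s; simp
          rw [hp, hf]

-- generic '(for s in L: if F(s) <= cap: out.append(s))' shape
theorem foldl_if_append_filter (cap : Int) (F : List Int → Int) :
    ∀ (L : List (List Int)) (acc : List (List Int)),
      L.foldl (fun a s => if F s ≤ cap then a ++ [s] else a) acc
        = acc ++ L.filter (fun s => decide (F s ≤ cap))
  | [], acc => by simp
  | s :: t, acc => by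
      by_cases h : F s ≤ cap <;>
        simp [List.foldl_cons, h, foldl_if_append_filter cap F t]

theorem all_subsets_except_depot_eq (V : List Int) (demands : List (Int × Int))
    (cap depot : Int) :
    all_subsets_except_depot V demands cap depot
      = all_subsets_except_depot_alt V demands cap depot := by
  unfold all_subsets_except_depot all_subsets_except_depot_alt
  have hstep : (fun (all_subsets : List (List Int)) (r : Int) =>
      (pyCombinations (V.filter (fun v => !(v == depot))) r.toNat).foldl
        (fun acc subset =>
          let total := subset.foldl (fun s node => s + (PySem.Dict.mk demands).getD node 0) 0
          if total ≤ cap then acc ++ [subset] else acc) all_subsets)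
      = (fun out r => out ++ altBuild demands cap (V.filter (fun v => !(v == depot))) r.toNat [] 0) := by
    funext acc r
    show (pyCombinations (V.filter (fun v => !(v == depot))) r.toNat).foldl
        (fun a s => if s.foldl (fun acc node => acc + (PySem.Dict.mk demands).getD node 0) 0 ≤ cap then a ++ [s] else a) acc = _
    rw [foldl_if_append_filter cap (fun s => s.foldl (fun acc node => acc + (PySem.Dict.mk demands).getD node 0) 0),
        altBuild_eq_filter]
    simp
  simp only [hstep]

-- ===== VERDICT (by name: the statement is the Claim_ definition above) =====
theorem all_subsets_except_depot_spec : Claim_equal_all_subsets_except_depot := by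
  intro V demands cap depot _ _
  unfold Spec_all_subsets_except_depot
  exact all_subsets_except_depot_eq V demands cap depot
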